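-- pv_equiv track=rewrite | github.com/ldavis9966/CAFA_Keywords_Count | author_list.py | get_taxon_id_counts
-- ===== SOURCE A (Python) =====
-- def get_taxon_id_counts(author_list):
--     taxon_id_counts = {}
--     for author in author_list:
--         for taxon_id in author_list[author]:
--             if taxon_id not in taxon_id_counts:
--                 taxon_id_counts[taxon_id] = 1
--             else:
--                 taxon_id_counts[taxon_id] += 1
--     return taxon_id_counts
-- ===== SOURCE B (Python) =====
-- def get_taxon_id_counts(author_list):
--     # Staged passes: flatten all taxon ids, dedup keeping first-seen order,
--     # then count each distinct id with list.count (no incremental dict updates).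
--     flat = [t for ids in author_list.values() for t in ids]
--     return {t: flat.count(t) for t in dict.fromkeys(flat)}
-- ===== Notes on version B (the rewrite author's own statement) =====
-- stated objective: alternative
-- what changed: Replaced the incremental per-element dict counting (membership test + in-place increment inside nested loops) by staged passes: flatten all taxon ids, deduplicate preserving first-seen order, then compute each distinct id's count with a separate list.count scan.
import Mathlib
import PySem

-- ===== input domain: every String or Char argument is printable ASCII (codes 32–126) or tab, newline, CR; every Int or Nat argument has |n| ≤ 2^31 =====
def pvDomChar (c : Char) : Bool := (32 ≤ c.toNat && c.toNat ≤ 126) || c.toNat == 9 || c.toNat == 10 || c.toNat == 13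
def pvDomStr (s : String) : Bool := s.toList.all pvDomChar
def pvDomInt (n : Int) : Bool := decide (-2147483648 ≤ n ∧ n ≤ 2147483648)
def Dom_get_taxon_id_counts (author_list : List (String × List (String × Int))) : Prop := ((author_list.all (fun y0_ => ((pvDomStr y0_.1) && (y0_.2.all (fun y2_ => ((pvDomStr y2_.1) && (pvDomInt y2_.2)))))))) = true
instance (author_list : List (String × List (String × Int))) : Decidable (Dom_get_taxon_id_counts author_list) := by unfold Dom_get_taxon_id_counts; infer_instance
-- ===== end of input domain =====

-- B replaces A's incremental dict counting by staged passes: flatten, dedup in first-seen order, count each key by a list scan (alternative decomposition, same results).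

-- ===== PORT A =====
def get_taxon_id_counts (author_list : List (String × List (String × Int))) : List (String × Int) :=
  (author_list.foldl
    (fun taxon_id_counts author =>
      author.2.foldl
        (fun taxon_id_counts taxon_id =>
          if taxon_id_counts.contains taxon_id.1 = false then
            taxon_id_counts.insert taxon_id.1 1
          else
            taxon_id_counts.modify taxon_id.1 0 (· + 1))
        taxon_id_counts)
    PySem.Dict.empty).items

-- ===== PORT B =====
def get_taxon_id_counts_alt (author_list : List (String × List (String × Int))) : List (String × Int) :=
  let flat := author_list.flatMap (fun ids => ids.2.map Prod.fst)
  (PySem.List.dedup flat).map (fun t => (t, (flat.count t : Int)))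

-- ===== PRECONDITION & SPEC =====
def Spec_get_taxon_id_counts (author_list : List (String × List (String × Int))) (out : List (String × Int)) : Prop := out = get_taxon_id_counts_alt author_list
instance (author_list : List (String × List (String × Int))) (out : List (String × Int)) : Decidable (Spec_get_taxon_id_counts author_list out) := by unfold Spec_get_taxon_id_counts; infer_instance

-- ===== CLAIM (what is proved, stated in full; the proofs are below) =====
def Claim_equal_get_taxon_id_counts : Prop := ∀ (author_list : List (String × List (String × Int))), Dom_get_taxon_id_counts author_list → Spec_get_taxon_id_counts author_list (get_taxon_id_counts author_list)

-- ===== LEMMAS AND PROOFS =====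

-- A's loop body is exactly one counting step of the Counter fold.
theorem step_eq_modify (d : PySem.Dict String Int) (k : String) :
    (if d.contains k = false then d.insert k 1 else d.modify k 0 (· + 1))
      = d.modify k 0 (· + 1) := by
  by_cases h : d.contains k = false
  · simp [h, PySem.Dict.modify, PySem.Dict.insert, PySem.Dict.getD_of_not_contains d 0 h]
  · simp [h]

-- ===== VERDICT (by name: the statement is the Claim_ definition above) =====
theorem get_taxon_id_counts_spec : Claim_equal_get_taxon_id_counts := by
  intro al _
  show _ = _
  unfold get_taxon_id_counts get_taxon_id_counts_alt
  have hA :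
      (al.foldl
        (fun taxon_id_counts author =>
          author.2.foldl
            (fun taxon_id_counts taxon_id =>
              if taxon_id_counts.contains taxon_id.1 = false then
                taxon_id_counts.insert taxon_id.1 1
              else
                taxon_id_counts.modify taxon_id.1 0 (· + 1))
            taxon_id_counts)
        PySem.Dict.empty)
      = PySem.Dict.counter (al.flatMap (fun ids => ids.2.map Prod.fst)) := by
    rw [PySem.Dict.counter_eq_foldl, List.foldl_flatMap]
    refine PySem.List.foldl_congr_mem _ _ _ _ (fun d author _ => ?_)
    rw [List.foldl_map]
    exact PySem.List.foldl_congr_mem _ _ _ _ (fun d' k _ => step_eq_modify d' k.1)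
  rw [hA, PySem.Dict.items_counter]
  simp only [PySem.List.dedup_eq_ofList]
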